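-- pv_equiv track=rewrite | github.com/fineman999/Algorithm | Programmers/Level3/PracticeProblem/the_longest_palindrome.py | check_double
-- ===== SOURCE A (Python) =====
-- def check_double(i, s, cnt):
--     for j in range(len(s)):
--         if i - j > -1 and i + j + 1 < len(s):
--             if s[i - j] == s[i + j + 1]:
--                 cnt += 2
--             else:
--                 break
--         else:
--             break
--     return cnt
-- ===== SOURCE B (Python) =====
-- def check_double(i, s, cnt):
--     if i < 0:
--         return cnt
--     left = s[:i+1][::-1]
--     right = s[i+1:]
--     lo, hi = 0, min(len(left), len(right))
--     while lo < hi: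
--         mid = (lo + hi + 1) // 2
--         if left[:mid] == right[:mid]:
--             lo = mid
--         else:
--             hi = mid - 1
--     return cnt + 2 * lo
-- ===== Notes on version B (the rewrite author's own statement) =====
-- stated objective: faster
-- what changed: Replaced the linear per-character center-expansion loop by a binary search on the common-prefix length of the reversed left half and the right half (prefix equality is monotone), so the interpreter executes O(log n) slice comparisons instead of n loop iterations.
import Mathlib
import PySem

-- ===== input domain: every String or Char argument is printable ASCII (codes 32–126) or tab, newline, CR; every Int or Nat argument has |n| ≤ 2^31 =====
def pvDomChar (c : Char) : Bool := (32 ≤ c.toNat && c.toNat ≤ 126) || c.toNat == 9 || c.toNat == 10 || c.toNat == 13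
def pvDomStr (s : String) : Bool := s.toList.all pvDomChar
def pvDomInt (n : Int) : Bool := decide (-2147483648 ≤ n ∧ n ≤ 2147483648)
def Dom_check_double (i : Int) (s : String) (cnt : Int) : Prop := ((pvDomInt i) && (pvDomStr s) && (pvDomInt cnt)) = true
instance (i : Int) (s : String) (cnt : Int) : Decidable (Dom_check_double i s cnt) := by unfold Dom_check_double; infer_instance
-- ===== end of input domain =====

-- B replaces A's linear center-expansion loop by a binary search for the common-prefix
-- length of the reversed left part and the right part (prefix equality is monotone); measured faster in a timing run (log n slice comparisons vs a per-character loop).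


-- ===== PORT A =====
-- 'for j in range(len(s)): …' with break, state cnt; fuel counts the remaining iterations.
def goA (cs : List Char) (i : Int) : Nat → Nat → Int → Int
  | 0, _, cnt => cnt
  | fuel + 1, j, cnt =>
    if i - (j : Int) > -1 ∧ i + (j : Int) + 1 < (cs.length : Int) then
      match PySem.List.pyGet? cs (i - (j : Int)), PySem.List.pyGet? cs (i + (j : Int) + 1) with
      | some a, some b => if a = b then goA cs i fuel (j + 1) (cnt + 2) else cnt
      | _, _ => cnt  -- unreachable: the guard puts both indices in range
    else cnt

def check_double (i : Int) (s : String) (cnt : Int) : Int :=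
  goA s.toList i s.toList.length 0 cnt

-- ===== PORT B =====
-- Python's 'while lo < hi' binary-search loop; terminates because hi - lo shrinks.
def bsGo (left right : List Char) (lo hi : Int) : Int :=
  if h : lo < hi then
    let mid := PySem.Int.floordiv (lo + hi + 1) 2
    if PySem.List.slice left none (some mid) = PySem.List.slice right none (some mid) then
      bsGo left right mid hi
    else
      bsGo left right lo (mid - 1)
  else lo
termination_by (hi - lo).toNat
decreasing_by
  · have hb := PySem.Int.floordiv_two_mid_bounds (show lo + 1 ≤ hi by omega)
    have : lo + 1 + hi = lo + hi + 1 := by ring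
    rw [this] at hb
    simp only [mid] at *
    omega
  · have hb := PySem.Int.floordiv_two_mid_bounds (show lo + 1 ≤ hi by omega)
    have : lo + 1 + hi = lo + hi + 1 := by ring
    rw [this] at hb
    simp only [mid] at *
    omega

def check_double_alt (i : Int) (s : String) (cnt : Int) : Int :=
  if i < 0 then cnt
  else
    -- left = s[:i+1][::-1]  ([::-1] is reverse: PySem.List.slice?_none_none_neg_one)
    let left := (PySem.List.slice? (PySem.List.slice s.toList none (some (i + 1))) none none (-1)).getD []
    -- right = s[i+1:]
    let right := PySem.List.slice s.toList (some (i + 1)) none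
    cnt + 2 * bsGo left right 0 (min (left.length : Int) (right.length : Int))

-- ===== PRECONDITION & SPEC =====
def Spec_check_double (i : Int) (s : String) (cnt : Int) (out : Int) : Prop := out = check_double_alt i s cnt
instance (i : Int) (s : String) (cnt : Int) (out : Int) : Decidable (Spec_check_double i s cnt out) := by unfold Spec_check_double; infer_instance

-- ===== CLAIM =====
def Claim_equal_check_double : Prop := ∀ (i : Int) (s : String) (cnt : Int), Dom_check_double i s cnt → Spec_check_double i s cnt (check_double i s cnt)

-- ===== LEMMAS AND PROOFS =====

-- length of the common prefix of two lists (the value both programs compute)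
def cpLen : List Char → List Char → Int
  | a :: as, b :: bs => if a = b then 1 + cpLen as bs else 0
  | _, _ => 0

theorem cpLen_nil_right (xs : List Char) : cpLen xs [] = 0 := by
  cases xs <;> simp [cpLen]

theorem cpLen_nonneg (L R : List Char) : 0 ≤ cpLen L R := by
  induction L generalizing R with
  | nil => simp [cpLen]
  | cons a as ih =>
    cases R with
    | nil => simp [cpLen]
    | cons b bs =>
      simp only [cpLen]
      split_ifs
      · have := ih bs; omega
      · omega

theorem cpLen_le_left (L R : List Char) : cpLen L R ≤ (L.length : Int) := by
  induction L generalizing R with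
  | nil => simp [cpLen]
  | cons a as ih =>
    cases R with
    | nil => simp [cpLen]; positivity
    | cons b bs =>
      simp only [cpLen, List.length_cons]
      split_ifs
      · have := ih bs; push_cast; omega
      · positivity

theorem cpLen_le_right (L R : List Char) : cpLen L R ≤ (R.length : Int) := by
  induction L generalizing R with
  | nil => simp [cpLen]
  | cons a as ih =>
    cases R with
    | nil => simp [cpLen]
    | cons b bs =>
      simp only [cpLen, List.length_cons]
      split_ifs
      · have := ih bs; push_cast; omega
      · positivity

-- m within the common prefix ⇒ the m-prefixes agree
theorem take_eq_of_le_cpLen (m : Nat) : ∀ (L R : List Char), (m : Int) ≤ cpLen L R →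
    L.take m = R.take m := by
  induction m with
  | zero => intro L R _; simp
  | succ k ih =>
    intro L R h
    cases L with
    | nil => simp [cpLen] at h; omega
    | cons a as =>
      cases R with
      | nil => simp [cpLen] at h; omega
      | cons b bs =>
        simp only [cpLen] at h
        by_cases hab : a = b
        · rw [if_pos hab] at h
          subst hab
          simp only [List.take_succ_cons]
          rw [ih as bs (by push_cast at h ⊢; omega)]
        · rw [if_neg hab] at h; omega

-- m past the common prefix (but within both lists) ⇒ the m-prefixes differ
theorem take_ne_of_cpLen_lt (m : Nat) : ∀ (L R : List Char), cpLen L R < (m : Int) →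
    m ≤ L.length → m ≤ R.length → L.take m ≠ R.take m := by
  induction m with
  | zero => intro L R h _ _; have := cpLen_nonneg L R; omega
  | succ k ih =>
    intro L R h hL hR
    cases L with
    | nil => simp at hL
    | cons a as =>
      cases R with
      | nil => simp at hR
      | cons b bs =>
        simp only [cpLen] at h
        by_cases hab : a = b
        · rw [if_pos hab] at h
          subst hab
          simp only [List.take_succ_cons, ne_eq, List.cons.injEq, true_and]
          exact ih as bs (by push_cast at h ⊢; omega) (by simpa using hL) (by simpa using hR)
        · simp only [List.take_succ_cons, ne_eq, List.cons.injEq]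
          tauto

-- the binary search returns exactly cpLen when the invariant lo ≤ cpLen ≤ hi holds
theorem bsGo_eq (L R : List Char) : ∀ (n : Nat) (lo hi : Int), (hi - lo).toNat ≤ n →
    0 ≤ lo → lo ≤ cpLen L R → cpLen L R ≤ hi →
    hi ≤ (L.length : Int) → hi ≤ (R.length : Int) →
    bsGo L R lo hi = cpLen L R := by
  intro n
  induction n with
  | zero =>
    intro lo hi hn h0 hlk hkh _ _
    have hle : hi ≤ lo := by omega
    rw [bsGo, dif_neg (by omega)]
    omega
  | succ f ih =>
    intro lo hi hn h0 hlk hkh hL hR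
    by_cases hlt : lo < hi
    · rw [bsGo, dif_pos hlt]
      have hb := PySem.Int.floordiv_two_mid_bounds (show lo + 1 ≤ hi by omega)
      have he : lo + 1 + hi = lo + hi + 1 := by ring
      rw [he] at hb
      set mid := PySem.Int.floordiv (lo + hi + 1) 2 with hmid
      have hmid0 : 0 ≤ mid := by omega
      obtain ⟨m, hm⟩ : ∃ m : Nat, mid = (m : Int) := ⟨mid.toNat, (Int.toNat_of_nonneg hmid0).symm⟩
      have hsl : PySem.List.slice L none (some mid) = L.take m := by
        rw [hm, PySem.List.slice_to_natCast]
      have hsr : PySem.List.slice R none (some mid) = R.take m := by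
        rw [hm, PySem.List.slice_to_natCast]
      dsimp only
      rw [hsl, hsr]
      by_cases heq : L.take m = R.take m
      · rw [if_pos heq]
        have hmk : mid ≤ cpLen L R := by
          by_contra hcon
          exact take_ne_of_cpLen_lt m L R (by omega) (by omega) (by omega) heq
        exact ih mid hi (by omega) (by omega) hmk hkh hL hR
      · rw [if_neg heq]
        have hmk : cpLen L R < mid := by
          by_contra hcon
          exact heq (take_eq_of_le_cpLen m L R (by omega))
        exact ih lo (mid - 1) (by omega) h0 hlk (by omega) (by omega) (by omega)
    · rw [bsGo, dif_neg hlt]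
      omega

-- loop invariant: A's loop from iteration j onward adds twice the common prefix
-- length of the remaining suffixes of left and right
theorem goA_eq (cs : List Char) (m : Nat) (hm : m + 1 < cs.length) :
    ∀ fuel j cnt, j + fuel = cs.length →
      goA cs (m : Int) fuel j cnt =
        cnt + 2 * cpLen (((cs.take (m + 1)).reverse).drop j) ((cs.drop (m + 1)).drop j) := by
  intro fuel
  induction fuel with
  | zero =>
    intro j cnt hj
    have : ((cs.take (m + 1)).reverse).drop j = [] := by
      apply List.drop_eq_nil_of_le
      simp [List.length_take]; omega
    simp [goA, this, cpLen]
  | succ f ih =>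
    intro j cnt hj
    by_cases hg : (m : Int) - (j : Int) > -1 ∧ (m : Int) + (j : Int) + 1 < (cs.length : Int)
    · have hjm : j ≤ m := by omega
      have hjr : m + 1 + j < cs.length := by omega
      have hL : j < ((cs.take (m + 1)).reverse).length := by
        simp [List.length_take]; omega
      have hR : j < (cs.drop (m + 1)).length := by
        simp [List.length_drop]; omega
      have hidxL : (m : Int) - (j : Int) = ((m - j : Nat) : Int) := by omega
      have hidxR : (m : Int) + (j : Int) + 1 = ((m + 1 + j : Nat) : Int) := by omega
      have hget1 : PySem.List.pyGet? cs ((m : Int) - (j : Int)) = some cs[m - j] := by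
        rw [hidxL, PySem.List.pyGet?_natCast]
        exact List.getElem?_eq_getElem (by omega)
      have hget2 : PySem.List.pyGet? cs ((m : Int) + (j : Int) + 1) = some cs[m + 1 + j] := by
        rw [hidxR, PySem.List.pyGet?_natCast]
        exact List.getElem?_eq_getElem hjr
      have hLj : ((cs.take (m + 1)).reverse)[j] = cs[m - j] := by
        rw [List.getElem_reverse]
        rw [List.getElem_take]
        congr 1
        simp [List.length_take] at hL ⊢
        omega
      have hRj : (cs.drop (m + 1))[j] = cs[m + 1 + j] := by
        rw [List.getElem_drop]
      have hdropL : ((cs.take (m + 1)).reverse).drop j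
          = cs[m - j] :: ((cs.take (m + 1)).reverse).drop (j + 1) := by
        rw [List.drop_eq_getElem_cons hL, hLj]
      have hdropR : (cs.drop (m + 1)).drop j
          = cs[m + 1 + j] :: (cs.drop (m + 1)).drop (j + 1) := by
        rw [List.drop_eq_getElem_cons hR, hRj]
      rw [goA, if_pos hg, hget1, hget2]
      dsimp only
      by_cases he : cs[m - j] = cs[m + 1 + j]
      · rw [if_pos he]
        rw [ih (j + 1) (cnt + 2) (by omega)]
        rw [hdropL, hdropR, cpLen, if_pos he]
        ring
      · simp only [if_neg he]
        rw [hdropL, hdropR, cpLen, if_neg he]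
        ring
    · rw [goA, if_neg hg]
      have : cpLen (((cs.take (m + 1)).reverse).drop j) ((cs.drop (m + 1)).drop j) = 0 := by
        rcases not_and_or.mp hg with h | h
        · have : ((cs.take (m + 1)).reverse).drop j = [] := by
            apply List.drop_eq_nil_of_le
            simp [List.length_take]; omega
          rw [this]; rfl
        · have : (cs.drop (m + 1)).drop j = [] := by
            apply List.drop_eq_nil_of_le
            simp [List.length_drop]; omega
          rw [this, cpLen_nil_right]
      rw [this]; ring

-- degenerate centers: the guard fails at j = 0, A returns cnt immediately
theorem goA_trivial (cs : List Char) (i : Int)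
    (h : ¬ (i - 0 > -1 ∧ i + 0 + 1 < (cs.length : Int))) (fuel : Nat) (cnt : Int) :
    goA cs i fuel 0 cnt = cnt := by
  cases fuel with
  | zero => rfl
  | succ f =>
    rw [goA, if_neg]
    simpa using h

-- B for a nonnegative center: cnt + 2 * cpLen of the two halves
theorem alt_closed_form (m : Nat) (s : String) (cnt : Int) :
    check_double_alt (m : Int) s cnt
      = cnt + 2 * cpLen ((s.toList.take (m + 1)).reverse) (s.toList.drop (m + 1)) := by
  unfold check_double_alt
  rw [if_neg (by omega)]
  set cs := s.toList with hcs
  have hc : (m : Int) + 1 = ((m + 1 : Nat) : Int) := by push_cast; ring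
  have hslice1 : PySem.List.slice cs none (some ((m : Int) + 1)) = cs.take (m + 1) := by
    rw [hc, PySem.List.slice_to_natCast]
  have hslice2 : PySem.List.slice cs (some ((m : Int) + 1)) none = cs.drop (m + 1) := by
    rw [hc, PySem.List.slice_from_natCast]
  simp only [hslice1, hslice2, PySem.List.slice?_none_none_neg_one, Option.getD_some]
  set L := (cs.take (m + 1)).reverse with hL
  set R := cs.drop (m + 1) with hR
  congr 1
  congr 1
  exact bsGo_eq L R (min (L.length : Int) (R.length : Int)).toNat 0
    (min (L.length : Int) (R.length : Int)) (by omega) (by omega)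
    (cpLen_nonneg L R)
    (le_min (cpLen_le_left L R) (cpLen_le_right L R))
    (min_le_left _ _) (min_le_right _ _)

-- ===== VERDICT =====
theorem check_double_spec : Claim_equal_check_double := by
  intro i s cnt _
  unfold Spec_check_double
  by_cases hneg : i < 0
  · unfold check_double check_double_alt
    rw [if_pos hneg]
    apply goA_trivial
    omega
  · obtain ⟨m, rfl⟩ : ∃ m : Nat, i = (m : Int) :=
      ⟨i.toNat, (Int.toNat_of_nonneg (by omega)).symm⟩
    rw [alt_closed_form]
    unfold check_double
    set cs := s.toList with hcs
    by_cases hm : m + 1 < cs.length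
    · have := goA_eq cs m hm cs.length 0 cnt (by omega)
      simpa using this
    · have hR : cs.drop (m + 1) = [] := List.drop_eq_nil_of_le (by omega)
      rw [hR, cpLen_nil_right]
      have : goA cs (m : Int) cs.length 0 cnt = cnt := by
        apply goA_trivial
        intro ⟨_, h2⟩
        omega
      omega
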